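-- pv_equiv track=rewrite | github.com/RangikaM/RTP_creator | RTP_creator.py | replace_numbers_with_atom_names
-- ===== SOURCE A (Python) =====
-- def replace_numbers_with_atom_names(lines, atoms):
--     bonds_section = False
--     angles_section = False
--     dihedrals_section = False
--
--     for i in range(len(lines)):
--         line = lines[i]
--
--         if line.strip().startswith('[ bonds ]'):
--             bonds_section = True
--             angles_section = False
--             dihedrals_section = False
--         elif line.strip().startswith('[ angles ]'):
--             bonds_section = False
--             angles_section = True
--             dihedrals_section = False
--         elif line.strip().startswith('[ dihedrals ]'):
--             bonds_section = False
--             angles_section = False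
--             dihedrals_section = True
--         elif line.strip().startswith('['):
--             bonds_section = False
--             angles_section = False
--             dihedrals_section = False
--
--         if bonds_section or angles_section or dihedrals_section:
--             if not line.startswith(';') and line.strip():
--                 data = line.split()
--                 if bonds_section and len(data) >= 2:
--                     for j in range(2):
--                         if data[j].isdigit():
--                             number = int(data[j])
--                             if number in atoms:
--                                 data[j] = atoms[number]
--                 elif angles_section and len(data) >= 3:
--                     for j in range(3):
--                         if data[j].isdigit():
--                             number = int(data[j])
--                             if number in atoms:
--                                 data[j] = atoms[number]
--                 elif dihedrals_section and len(data) >= 4: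
--                     for j in range(4):
--                         if data[j].isdigit():
--                             number = int(data[j])
--                             if number in atoms:
--                                 data[j] = atoms[number]
--
--                 lines[i] = ' '.join(data) + '\n'
--
--     return lines
-- ===== SOURCE B (Python) =====
-- def replace_numbers_with_atom_names(lines, atoms):
--     # Staged segmentation: cut the file into sections at header lines, then map a
--     # pure per-line rewrite over each replacement section. Mutates `lines` like A
--     # (final contents identical); equivalence claimed about the return value.
--     table = (('[ bonds ]', 2), ('[ angles ]', 3), ('[ dihedrals ]', 4))
--
--     def is_header(l):
--         return l.strip().startswith('[')
--
--     def cols_of(l):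
--         s = l.strip()
--         for prefix, c in table:
--             if s.startswith(prefix):
--                 return c
--         return 0
--
--     def fix(l, cols):
--         if l.startswith(';') or not l.strip():
--             return l
--         data = l.split()
--         if len(data) >= cols:
--             data = [atoms[int(t)] if t.isdigit() and int(t) in atoms else t
--                     for t in data[:cols]] + data[cols:]
--         return ' '.join(data) + '\n'
--
--     n = len(lines)
--     out = []
--     i = 0
--     while i < n and not is_header(lines[i]):
--         out.append(lines[i])
--         i += 1
--     while i < n:
--         j = i + 1
--         while j < n and not is_header(lines[j]):
--             j += 1
--         cols = cols_of(lines[i])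
--         seg = lines[i:j]
--         if cols:
--             out.extend(fix(l, cols) for l in seg)
--         else:
--             out.extend(seg)
--         i = j
--     lines[:] = out
--     return lines
-- ===== Notes on version B (the rewrite author's own statement) =====
-- stated objective: alternative
-- what changed: Replaces A's single flag-carrying pass by a staged segmentation: the file is first cut into sections at header lines, then a pure per-line rewrite (column count fixed per section) is mapped over each replacement section and the pieces are concatenated.
import Mathlib
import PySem

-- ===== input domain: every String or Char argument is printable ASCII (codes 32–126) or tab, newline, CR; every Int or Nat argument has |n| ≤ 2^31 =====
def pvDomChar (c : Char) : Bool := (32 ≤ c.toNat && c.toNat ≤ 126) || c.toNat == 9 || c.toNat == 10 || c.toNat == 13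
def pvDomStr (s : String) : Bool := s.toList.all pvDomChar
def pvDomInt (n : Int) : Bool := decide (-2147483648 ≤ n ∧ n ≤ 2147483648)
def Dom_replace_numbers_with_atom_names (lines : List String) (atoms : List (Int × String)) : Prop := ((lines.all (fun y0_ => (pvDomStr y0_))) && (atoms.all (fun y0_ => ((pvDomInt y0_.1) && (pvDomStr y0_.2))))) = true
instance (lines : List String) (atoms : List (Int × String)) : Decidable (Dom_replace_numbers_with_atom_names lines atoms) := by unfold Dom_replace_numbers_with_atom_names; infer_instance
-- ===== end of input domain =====

-- B replaces A's single flag-carrying pass by a staged segmentation: cut the file into sections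
-- at header lines, then map a pure per-line rewrite over each replacement section (objective:
-- alternative). Both Pythons leave `lines` with the same final contents; the theorems below are
-- about the return value.

-- ===== PORT A =====
-- A's section-flag update (the 4-way elif chain on line.strip())
def pvSecA (s : String) (fl : Bool × Bool × Bool) : Bool × Bool × Bool :=
  if PySem.Str.startswith s "[ bonds ]" then (true, false, false)
  else if PySem.Str.startswith s "[ angles ]" then (false, true, false)
  else if PySem.Str.startswith s "[ dihedrals ]" then (false, false, true)
  else if PySem.Str.startswith s "[" then (false, false, false)
  else fl

-- A's inner 'for j in range(k): if data[j].isdigit(): …; data[j] = atoms[number]' loop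
def pvLoopA (atoms : List (Int × String)) (data : List String) (k : Nat) : List String :=
  (List.range k).foldl (fun d (j : Nat) =>
    match PySem.List.pyGet? d ((j : Nat) : Int) with
    | none => d
    | some t =>
      if PySem.Str.strIsdigit t then
        match PySem.Int.ofStr? t with
        | none => d
        | some number =>
          if (PySem.Dict.mk atoms).contains number then
            d.set j (((PySem.Dict.mk atoms).get? number).getD t)
          else d
      else d) data

def pvStepA (atoms : List (Int × String)) (st : List String × (Bool × Bool × Bool)) (i : Int) :
    List String × (Bool × Bool × Bool) :=
  match PySem.List.pyGet? st.1 i with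
  | none => st
  | some line =>
    let s := PySem.Str.strip line
    let fl := pvSecA s st.2
    if (fl.1 || fl.2.1 || fl.2.2) && !PySem.Str.startswith line ";" && !(s == "") then
      let data := PySem.Str.split₀ line
      let data :=
        if fl.1 && decide (data.length ≥ 2) then pvLoopA atoms data 2
        else if fl.2.1 && decide (data.length ≥ 3) then pvLoopA atoms data 3
        else if fl.2.2 && decide (data.length ≥ 4) then pvLoopA atoms data 4
        else data
      (st.1.set i.toNat (PySem.Str.join " " data ++ "\n"), fl)
    else (st.1, fl)

def replace_numbers_with_atom_names (lines : List String) (atoms : List (Int × String)) : List String :=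
  ((PySem.List.pyRange 0 (lines.length : Int) 1).foldl (pvStepA atoms) (lines, (false, false, false))).1

-- ===== PORT B =====
-- B's is_header(l)
def pvIsHeader (l : String) : Bool := PySem.Str.startswith (PySem.Str.strip l) "["

-- B's cols_of(l): linear scan of the header table
def pvColsOf (l : String) : Nat :=
  let s := PySem.Str.strip l
  if PySem.Str.startswith s "[ bonds ]" then 2
  else if PySem.Str.startswith s "[ angles ]" then 3
  else if PySem.Str.startswith s "[ dihedrals ]" then 4
  else 0

-- B's token rewrite: atoms[int(t)] if t.isdigit() and int(t) in atoms else t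
def pvTokB (atoms : List (Int × String)) (t : String) : String :=
  if PySem.Str.strIsdigit t then
    match PySem.Int.ofStr? t with
    | none => t
    | some n =>
      if (PySem.Dict.mk atoms).contains n then ((PySem.Dict.mk atoms).get? n).getD t else t
  else t

-- B's fix(l, cols): pure per-line rewrite
def pvFix (atoms : List (Int × String)) (cols : Nat) (l : String) : String :=
  if PySem.Str.startswith l ";" || (PySem.Str.strip l == "") then l
  else
    let data := PySem.Str.split₀ l
    let data :=
      if data.length ≥ cols then (data.take cols).map (pvTokB atoms) ++ data.drop cols else data
    PySem.Str.join " " data ++ "\n"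

-- B's second while loop: peel off one section (header + following non-header body) at a time
def pvSegLoop (atoms : List (Int × String)) : List String → List String
  | [] => []
  | h :: rest =>
    let cols := pvColsOf h
    let body := rest.takeWhile (fun l => !pvIsHeader l)
    let rest' := rest.dropWhile (fun l => !pvIsHeader l)
    (if cols == 0 then h :: body else (h :: body).map (pvFix atoms cols)) ++ pvSegLoop atoms rest'
  termination_by ls => ls.length
  decreasing_by
    have := List.length_dropWhile_le (fun l => !pvIsHeader l) rest
    simp
    omega

def replace_numbers_with_atom_names_alt (lines : List String) (atoms : List (Int × String)) : List String :=
  lines.takeWhile (fun l => !pvIsHeader l) ++ pvSegLoop atoms (lines.dropWhile (fun l => !pvIsHeader l))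

-- ===== PRECONDITION & SPEC =====
def Spec_replace_numbers_with_atom_names (lines : List String) (atoms : List (Int × String)) (out : List String) : Prop := out = replace_numbers_with_atom_names_alt lines atoms
instance (lines : List String) (atoms : List (Int × String)) (out : List String) : Decidable (Spec_replace_numbers_with_atom_names lines atoms out) := by unfold Spec_replace_numbers_with_atom_names; infer_instance

-- ===== CLAIM (what is proved, stated in full; the proofs are below) =====
def Claim_equal_replace_numbers_with_atom_names : Prop := ∀ (lines : List String) (atoms : List (Int × String)), Dom_replace_numbers_with_atom_names lines atoms → Spec_replace_numbers_with_atom_names lines atoms (replace_numbers_with_atom_names lines atoms)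

-- ===== LEMMAS AND PROOFS =====

-- proof-side middle pass: A's single pass rephrased with a column-count state
def pvSecB (s : String) (cols : Nat) : Nat :=
  if PySem.Str.startswith s "[" then
    if PySem.Str.startswith s "[ bonds ]" then 2
    else if PySem.Str.startswith s "[ angles ]" then 3
    else if PySem.Str.startswith s "[ dihedrals ]" then 4
    else 0
  else cols

def pvRow (atoms : List (Int × String)) (cols : Nat) (line : String) : String :=
  if cols == 0 then line else pvFix atoms cols line

def pvMidStep (atoms : List (Int × String)) (st : List String × Nat) (line : String) :
    List String × Nat :=
  let cols := pvSecB (PySem.Str.strip line) st.2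
  (st.1 ++ [pvRow atoms cols line], cols)

-- the flag-triples A can reach, and their correspondence with the column count
def pvFlagsOf (cols : Nat) : Bool × Bool × Bool :=
  if cols = 2 then (true, false, false)
  else if cols = 3 then (false, true, false)
  else if cols = 4 then (false, false, true)
  else (false, false, false)

def pvRel (fl : Bool × Bool × Bool) (cols : Nat) : Prop :=
  (cols = 0 ∨ cols = 2 ∨ cols = 3 ∨ cols = 4) ∧ fl = pvFlagsOf cols

theorem pv_startswith_sub {s : String} {p : String}
    (hsub : "[".toList <+: p.toList) (h : PySem.Str.startswith s p = true) :
    PySem.Str.startswith s "[" = true := by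
  rw [PySem.Str.startswith_eq] at *
  rw [PySem.Chars.startswith_iff] at *
  exact hsub.trans h

theorem pvSec_rel (s : String) (fl : Bool × Bool × Bool) (cols : Nat) (h : pvRel fl cols) :
    pvRel (pvSecA s fl) (pvSecB s cols) := by
  unfold pvSecA pvSecB
  by_cases h1 : PySem.Str.startswith s "[ bonds ]" = true
  · have h0 := pv_startswith_sub (p := "[ bonds ]") (by decide) h1
    rw [if_pos h1, if_pos h0, if_pos h1]
    exact ⟨Or.inr (Or.inl rfl), rfl⟩
  · by_cases h2 : PySem.Str.startswith s "[ angles ]" = true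
    · have h0 := pv_startswith_sub (p := "[ angles ]") (by decide) h2
      rw [if_neg h1, if_pos h2, if_pos h0, if_neg h1, if_pos h2]
      exact ⟨Or.inr (Or.inr (Or.inl rfl)), rfl⟩
    · by_cases h3 : PySem.Str.startswith s "[ dihedrals ]" = true
      · have h0 := pv_startswith_sub (p := "[ dihedrals ]") (by decide) h3
        rw [if_neg h1, if_neg h2, if_pos h3, if_pos h0, if_neg h1, if_neg h2, if_pos h3]
        exact ⟨Or.inr (Or.inr (Or.inr rfl)), rfl⟩
      · by_cases h4 : PySem.Str.startswith s "[" = true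
        · rw [if_neg h1, if_neg h2, if_neg h3, if_pos h4, if_pos h4, if_neg h1, if_neg h2, if_neg h3]
          exact ⟨Or.inl rfl, rfl⟩
        · rw [if_neg h1, if_neg h2, if_neg h3, if_neg h4, if_neg h4]
          exact h

-- A's in-place index loop rewrites the first k tokens exactly as B's comprehension does
theorem pvLoopA_eq (atoms : List (Int × String)) (data : List String) (k : Nat)
    (hk : k ≤ data.length) :
    pvLoopA atoms data k = (data.take k).map (pvTokB atoms) ++ data.drop k := by
  induction k with
  | zero => simp [pvLoopA]
  | succ k ih =>
    have hk' : k ≤ data.length := Nat.le_of_succ_le hk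
    have hklt : k < data.length := hk
    unfold pvLoopA at ih ⊢
    rw [List.range_succ, List.foldl_append, ih hk']
    have hlen : ((data.take k).map (pvTokB atoms)).length = k := by
      simp [List.length_take, Nat.min_eq_left hk']
    have hdrop : data.drop k = data[k] :: data.drop (k + 1) :=
      (List.drop_eq_getElem_cons hklt)
    rw [hdrop]
    have hget : PySem.List.pyGet?
        ((data.take k).map (pvTokB atoms) ++ data[k] :: data.drop (k + 1)) ((k : Nat) : Int)
        = some data[k] := by
      have h := PySem.List.pyGet?_append_length ((data.take k).map (pvTokB atoms))
        (data.drop (k + 1)) data[k]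
      rw [hlen] at h
      exact h
    simp only [List.foldl_cons, List.foldl_nil, hget]
    have hset : ∀ v, ((data.take k).map (pvTokB atoms) ++ data[k] :: data.drop (k + 1)).set k v
        = (data.take k).map (pvTokB atoms) ++ v :: data.drop (k + 1) := by
      intro v
      rw [List.set_append_right _ _ (by omega), hlen, Nat.sub_self]
      rfl
    have hd2 : data.take (k + 1) = data.take k ++ [data[k]] := by
      rw [List.take_add_one, List.getElem?_eq_getElem hklt]
      rfl
    have htake : (data.take (k + 1)).map (pvTokB atoms)
        = (data.take k).map (pvTokB atoms) ++ [pvTokB atoms data[k]] := by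
      rw [hd2, List.map_append]
      rfl
    rw [htake, List.append_assoc, List.singleton_append]
    by_cases hd : PySem.Str.strIsdigit data[k] = true
    · rw [if_pos hd]
      cases hi : PySem.Int.ofStr? data[k] with
      | none =>
        have ht : pvTokB atoms data[k] = data[k] := by
          unfold pvTokB
          rw [if_pos hd]
          simp only [hi]
        rw [ht]
      | some n =>
        simp only [hi]
        by_cases hc : (PySem.Dict.mk atoms).contains n = true
        · have ht : pvTokB atoms data[k] = ((PySem.Dict.mk atoms).get? n).getD data[k] := by
            unfold pvTokB
            rw [if_pos hd]
            simp only [hi]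
            rw [if_pos hc]
          rw [if_pos hc, ht, hset]
        · have ht : pvTokB atoms data[k] = data[k] := by
            unfold pvTokB
            rw [if_pos hd]
            simp only [hi]
            rw [if_neg hc]
          rw [if_neg hc, ht]
    · rw [if_neg hd]
      have ht : pvTokB atoms data[k] = data[k] := by
        unfold pvTokB
        rw [if_neg hd]
      rw [ht]

-- the three replacement branches of A compute the single sliced rewrite
theorem pvBranch_eq (atoms : List (Int × String)) (data : List String) (c : Nat)
    (hc : c = 2 ∨ c = 3 ∨ c = 4) :
    (if (pvFlagsOf c).1 && decide (data.length ≥ 2) then pvLoopA atoms data 2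
     else if (pvFlagsOf c).2.1 && decide (data.length ≥ 3) then pvLoopA atoms data 3
     else if (pvFlagsOf c).2.2 && decide (data.length ≥ 4) then pvLoopA atoms data 4
     else data)
    = (if data.length ≥ c then (data.take c).map (pvTokB atoms) ++ data.drop c else data) := by
  rcases hc with rfl | rfl | rfl
  · rw [show pvFlagsOf 2 = (true, false, false) from rfl]
    simp only [Bool.true_and, Bool.false_and, Bool.false_eq_true, if_false, decide_eq_true_eq]
    split_ifs with hlen
    · exact pvLoopA_eq _ _ _ hlen
    · rfl
  · rw [show pvFlagsOf 3 = (false, true, false) from rfl]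
    simp only [Bool.true_and, Bool.false_and, Bool.false_eq_true, if_false, decide_eq_true_eq]
    split_ifs with hlen
    · exact pvLoopA_eq _ _ _ hlen
    · rfl
  · rw [show pvFlagsOf 4 = (false, false, true) from rfl]
    simp only [Bool.true_and, Bool.false_and, Bool.false_eq_true, if_false, decide_eq_true_eq]
    split_ifs with hlen
    · exact pvLoopA_eq _ _ _ hlen
    · rfl

-- pvRow on a comment or blank line (nonzero cols) is the identity
theorem pvRow_skip (atoms : List (Int × String)) (c : Nat) (line : String)
    (h : (PySem.Str.startswith line ";" || (PySem.Str.strip line == "")) = true)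
    (hc : (c == 0) = false) : pvRow atoms c line = line := by
  unfold pvRow pvFix
  rw [if_neg (by simp [hc]), if_pos h]

-- pvRow on a processed line (nonzero cols) is the sliced rewrite
theorem pvRow_proc (atoms : List (Int × String)) (c : Nat) (line : String)
    (h5 : (PySem.Str.strip line == "") = false)
    (h6 : PySem.Str.startswith line ";" = false)
    (hc : (c == 0) = false) :
    pvRow atoms c line = PySem.Str.join " "
      (if (PySem.Str.split₀ line).length ≥ c then
        ((PySem.Str.split₀ line).take c).map (pvTokB atoms) ++ (PySem.Str.split₀ line).drop c
       else PySem.Str.split₀ line) ++ "\n" := by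
  have h6' : PySem.Chars.startswith line.toList [';'] = false := by simpa using h6
  have h5' : ¬ PySem.Str.strip line = "" := by simpa using h5
  unfold pvRow pvFix
  rw [if_neg (by simp [hc]), if_neg (by simp [h5', h6'])]

-- stepping A at the split point matches the middle pass's row
theorem pvStep_row (atoms : List (Int × String)) (pre rest : List String) (line : String)
    (fl : Bool × Bool × Bool) (cols : Nat) (h : pvRel fl cols) :
    pvStepA atoms (pre ++ line :: rest, fl) (pre.length : Int)
      = (pre ++ (pvRow atoms (pvSecB (PySem.Str.strip line) cols) line) :: rest,
         pvFlagsOf (pvSecB (PySem.Str.strip line) cols))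
    ∧ pvRel (pvFlagsOf (pvSecB (PySem.Str.strip line) cols)) (pvSecB (PySem.Str.strip line) cols) := by
  have hget : PySem.List.pyGet? (pre ++ line :: rest) (pre.length : Int) = some line :=
    PySem.List.pyGet?_append_length _ _ _
  have hrel' := pvSec_rel (PySem.Str.strip line) fl cols h
  have hfl' : pvSecA (PySem.Str.strip line) fl = pvFlagsOf (pvSecB (PySem.Str.strip line) cols) :=
    hrel'.2
  have hrel2 : pvRel (pvFlagsOf (pvSecB (PySem.Str.strip line) cols))
      (pvSecB (PySem.Str.strip line) cols) := hfl' ▸ hrel'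
  refine ⟨?_, hrel2⟩
  have hset : ∀ v, (pre ++ line :: rest).set ((pre.length : Int)).toNat v = pre ++ v :: rest := by
    intro v
    rw [Int.toNat_natCast, List.set_append_right _ _ (le_refl _)]
    simp
  have hAeq : pvStepA atoms (pre ++ line :: rest, fl) (pre.length : Int) =
      (let fl' := pvSecA (PySem.Str.strip line) fl
       if (fl'.1 || fl'.2.1 || fl'.2.2) && !PySem.Str.startswith line ";"
          && !(PySem.Str.strip line == "") then
        ((pre ++ line :: rest).set ((pre.length : Int)).toNat (PySem.Str.join " "
          (if fl'.1 && decide ((PySem.Str.split₀ line).length ≥ 2) then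
              pvLoopA atoms (PySem.Str.split₀ line) 2
            else if fl'.2.1 && decide ((PySem.Str.split₀ line).length ≥ 3) then
              pvLoopA atoms (PySem.Str.split₀ line) 3
            else if fl'.2.2 && decide ((PySem.Str.split₀ line).length ≥ 4) then
              pvLoopA atoms (PySem.Str.split₀ line) 4
            else PySem.Str.split₀ line) ++ "\n"), fl')
       else (pre ++ line :: rest, fl')) := by
    unfold pvStepA
    rw [hget]
  rw [hAeq, hfl']
  simp only []
  by_cases hc0 : pvSecB (PySem.Str.strip line) cols = 0
  · rw [hc0]
    simp [pvFlagsOf, pvRow]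
  · have hmem : pvSecB (PySem.Str.strip line) cols = 2 ∨ pvSecB (PySem.Str.strip line) cols = 3
        ∨ pvSecB (PySem.Str.strip line) cols = 4 := by
      rcases hrel2.1 with hx | hx | hx | hx
      · exact absurd hx hc0
      · exact Or.inl hx
      · exact Or.inr (Or.inl hx)
      · exact Or.inr (Or.inr hx)
    have hcne : ((pvSecB (PySem.Str.strip line) cols) == 0) = false := by
      simp [hc0]
    have hflne : ((pvFlagsOf (pvSecB (PySem.Str.strip line) cols)).1
        || (pvFlagsOf (pvSecB (PySem.Str.strip line) cols)).2.1
        || (pvFlagsOf (pvSecB (PySem.Str.strip line) cols)).2.2) = true := by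
      rcases hmem with hx | hx | hx <;> rw [hx] <;> rfl
    by_cases h5 : (PySem.Str.strip line == "") = true
    · rw [if_neg (by simp [h5]), pvRow_skip atoms _ line (by simp [h5]) hcne]
    · by_cases h6 : PySem.Str.startswith line ";" = true
      · have h6c : PySem.Chars.startswith line.toList [';'] = true := by simpa using h6
        rw [if_neg (by simp [h6c]), pvRow_skip atoms _ line (by simp [h6c]) hcne]
      · have h6' : PySem.Str.startswith line ";" = false := by simpa using h6
        have h5'' : (PySem.Str.strip line == "") = false := by simpa using h5
        have h6'' : PySem.Chars.startswith line.toList [';'] = false := by simpa using h6'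
        rw [if_pos (by simp [hflne, h5'', h6'']),
          pvBranch_eq atoms _ _ hmem, hset,
          pvRow_proc atoms _ line h5'' h6' hcne]

-- A's indexed fold equals the middle pass, for any processed prefix and related states
theorem pv_fold (atoms : List (Int × String)) (rest : List String) :
    ∀ (pre : List String) (fl : Bool × Bool × Bool) (cols : Nat), pvRel fl cols →
    ((PySem.List.pyRange (pre.length : Int) (((pre.length + rest.length : Nat)) : Int) 1).foldl
        (pvStepA atoms) (pre ++ rest, fl)).1
    = (rest.foldl (pvMidStep atoms) (pre, cols)).1 := by
  induction rest with
  | nil =>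
    intro pre fl cols _
    simp
  | cons line rest ih =>
    intro pre fl cols h
    obtain ⟨hA, hrel'⟩ := pvStep_row atoms pre rest line fl cols h
    have hcons : PySem.List.pyRange (pre.length : Int) ((pre.length + (line :: rest).length : Nat) : Int) 1
        = (pre.length : Int) :: PySem.List.pyRange ((pre.length : Int) + 1) ((pre.length + (line :: rest).length : Nat) : Int) 1 := by
      apply PySem.List.pyRange_one_cons
      have : (line :: rest).length = rest.length + 1 := rfl
      rw [this]
      omega
    rw [hcons, List.foldl_cons, hA, List.foldl_cons]
    have hB : pvMidStep atoms (pre, cols) line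
        = (pre ++ [pvRow atoms (pvSecB (PySem.Str.strip line) cols) line],
           pvSecB (PySem.Str.strip line) cols) := rfl
    rw [hB]
    have h1 : pre ++ pvRow atoms (pvSecB (PySem.Str.strip line) cols) line :: rest
        = (pre ++ [pvRow atoms (pvSecB (PySem.Str.strip line) cols) line]) ++ rest := by simp
    have h2 : ((pre.length : Int) + 1)
        = (((pre ++ [pvRow atoms (pvSecB (PySem.Str.strip line) cols) line]).length : Nat) : Int) := by simp
    have h3 : ((pre.length + (line :: rest).length : Nat) : Int)
        = (((pre ++ [pvRow atoms (pvSecB (PySem.Str.strip line) cols) line]).length + rest.length : Nat) : Int) := by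
      simp; omega
    rw [h1, h2, h3]
    exact ih _ (pvFlagsOf (pvSecB (PySem.Str.strip line) cols)) _ hrel'

-- pvSecB at a non-header keeps the state; at a header it is cols_of
theorem pvSecB_nonheader (l : String) (cols : Nat) (h : pvIsHeader l = false) :
    pvSecB (PySem.Str.strip l) cols = cols := by
  unfold pvSecB
  unfold pvIsHeader at h
  rw [h]
  simp

theorem pvSecB_header (l : String) (cols : Nat) (h : pvIsHeader l = true) :
    pvSecB (PySem.Str.strip l) cols = pvColsOf l := by
  unfold pvSecB pvColsOf
  unfold pvIsHeader at h
  rw [h]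
  simp

-- the middle pass computes B's segmentation
theorem pv_mid_seg (atoms : List (Int × String)) (ls : List String) :
    ∀ (pre : List String) (cols : Nat),
    (ls.foldl (pvMidStep atoms) (pre, cols)).1
    = pre ++ (ls.takeWhile (fun l => !pvIsHeader l)).map (pvRow atoms cols)
        ++ pvSegLoop atoms (ls.dropWhile (fun l => !pvIsHeader l)) := by
  induction ls with
  | nil =>
    intro pre cols
    simp [pvSegLoop]
  | cons l rest ih =>
    intro pre cols
    by_cases hh : pvIsHeader l = true
    · rw [List.takeWhile_cons_of_neg (by simp [hh]), List.dropWhile_cons_of_neg (by simp [hh])]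
      rw [List.foldl_cons]
      have hB : pvMidStep atoms (pre, cols) l = (pre ++ [pvRow atoms (pvColsOf l) l], pvColsOf l) := by
        unfold pvMidStep
        rw [pvSecB_header l cols hh]
      rw [hB, ih]
      rw [show pvSegLoop atoms (l :: rest)
          = (if pvColsOf l == 0 then l :: rest.takeWhile (fun l => !pvIsHeader l)
             else (l :: rest.takeWhile (fun l => !pvIsHeader l)).map (pvFix atoms (pvColsOf l)))
            ++ pvSegLoop atoms (rest.dropWhile (fun l => !pvIsHeader l)) from by
        rw [pvSegLoop]]
      by_cases hc : (pvColsOf l == 0) = true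
      · rw [if_pos hc]
        have hrow : pvRow atoms (pvColsOf l) l = l := by unfold pvRow; rw [if_pos hc]
        have hmap : (rest.takeWhile (fun l => !pvIsHeader l)).map (pvRow atoms (pvColsOf l))
            = rest.takeWhile (fun l => !pvIsHeader l) := by
          have h0 : pvColsOf l = 0 := by simpa using hc
          rw [h0]
          have hid : pvRow atoms 0 = fun x => x := by
            funext x
            unfold pvRow
            simp
          rw [hid]
          simp
        rw [hrow, hmap]
        simp
      · rw [if_neg hc]
        have hrow : pvRow atoms (pvColsOf l) l = pvFix atoms (pvColsOf l) l := by
          unfold pvRow; rw [if_neg hc]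
        have hmap : (rest.takeWhile (fun l => !pvIsHeader l)).map (pvRow atoms (pvColsOf l))
            = (rest.takeWhile (fun l => !pvIsHeader l)).map (pvFix atoms (pvColsOf l)) := by
          apply List.map_congr_left
          intro x _
          unfold pvRow; rw [if_neg hc]
        rw [hrow, hmap]
        simp
    · have hh' : pvIsHeader l = false := by simpa using hh
      rw [List.takeWhile_cons_of_pos (by simp [hh']), List.dropWhile_cons_of_pos (by simp [hh'])]
      rw [List.foldl_cons]
      have hB : pvMidStep atoms (pre, cols) l = (pre ++ [pvRow atoms cols l], cols) := by
        unfold pvMidStep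
        rw [pvSecB_nonheader l cols hh']
      rw [hB, ih]
      simp

-- ===== VERDICT (by name: the statement is the Claim_ definition above) =====
theorem replace_numbers_with_atom_names_spec : Claim_equal_replace_numbers_with_atom_names := by
  intro lines atoms _
  unfold Spec_replace_numbers_with_atom_names replace_numbers_with_atom_names replace_numbers_with_atom_names_alt
  have h1 := pv_fold atoms lines [] (false, false, false) 0 (by simp [pvRel, pvFlagsOf])
  have h2 := pv_mid_seg atoms lines [] 0
  have hmap : (lines.takeWhile (fun l => !pvIsHeader l)).map (pvRow atoms 0)
      = lines.takeWhile (fun l => !pvIsHeader l) := by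
    have hid : pvRow atoms 0 = fun x => x := by
      funext x
      unfold pvRow
      simp
    rw [hid]
    simp
  simp only [List.nil_append, hmap] at h2
  simpa [h2] using h1
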